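-- pv_equiv track=rewrite | github.com/Alvorecer721/Multi-lingual-Picture-Book-Reader | utils/text.py | count_greater
-- ===== SOURCE A (Python) =====
-- def count_greater(d):
--     """
--     count how many elements in the target list is the greatest among all lists
--     :param d: dequeued list
--     :return: count
--     """
--     numElement = len(d)
--     minLength = len(min(d, key=len))
--     count = 0
--
--     for i in range(minLength):
--         if all_greater(i, numElement, d):
--             count += 1
--
--     return count
--
-- def all_greater(n, m, d):
--     """
--     check whether the specified element is the greatest
--     :param n: number of lists in the dequeued list
--     :param m: length of shortest list in the dequeued list
--     :param d: dequeued list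
--     :return: true or false
--     """
--     flag = True
--     for i in range(1, m):
--         if d[0][n] < d[i][n]:
--             flag = False
--
--     return flag
-- ===== SOURCE B (Python) =====
-- def count_greater(d):
--     # row-wise elimination: keep a set of surviving column indices and let each
--     # other row knock out the columns where it beats the first row
--     first = d[0]
--     m = min(len(r) for r in d)
--     alive = set(range(m))
--     for r in d[1:]:
--         alive = {j for j in alive if not first[j] < r[j]}
--     return len(alive)
-- ===== Notes on version B (the rewrite author's own statement) =====
-- stated objective: alternative
-- what changed: Replaces A's column-major double loop (for each column, rescan all rows) by row-major elimination: a surviving set of column indices is filtered once per remaining row, so already-eliminated columns are never compared again.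
-- outside the precondition, e.g. on count_greater([]): A raises ValueError, B raises IndexError
import Mathlib
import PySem

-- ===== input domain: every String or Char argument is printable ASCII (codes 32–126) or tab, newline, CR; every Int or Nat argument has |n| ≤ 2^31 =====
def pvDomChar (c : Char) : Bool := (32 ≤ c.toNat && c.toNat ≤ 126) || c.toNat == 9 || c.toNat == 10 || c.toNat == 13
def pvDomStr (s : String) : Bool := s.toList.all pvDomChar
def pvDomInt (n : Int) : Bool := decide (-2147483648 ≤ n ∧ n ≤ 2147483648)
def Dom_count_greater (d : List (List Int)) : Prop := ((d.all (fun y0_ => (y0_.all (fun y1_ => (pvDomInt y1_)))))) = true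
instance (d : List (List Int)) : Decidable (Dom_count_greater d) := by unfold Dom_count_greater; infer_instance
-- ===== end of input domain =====

-- B replaces A's column-major double loop by row-major elimination: a surviving
-- set of column indices is filtered once per remaining row (alternative decomposition).


-- ===== PORT A =====
def all_greater (n : Int) (m : Int) (d : List (List Int)) : Bool :=
  (PySem.List.pyRange 1 m 1).foldl
    (fun flag i =>
      if PySem.List.pyGetD (PySem.List.pyGetD d 0 []) n 0 <
         PySem.List.pyGetD (PySem.List.pyGetD d i []) n 0 then false else flag)
    true

def count_greater (d : List (List Int)) : Int :=
  let numElement := PySem.List.len d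
  match PySem.List.min? d (fun r => PySem.List.len r) with
  | none => 0  -- unreachable under Pre_: on d = [] Python's min raises ValueError
  | some mrow =>
    let minLength := PySem.List.len mrow
    (PySem.List.pyRange 0 minLength 1).foldl
      (fun count i => if all_greater i numElement d then count + 1 else count) 0

-- ===== PORT B =====
def count_greater_alt (d : List (List Int)) : Int :=
  let first := PySem.List.pyGetD d 0 []   -- d[0]; raises on d = [], excluded by Pre_
  match PySem.List.min? (d.map (fun r => PySem.List.len r)) (fun x => x) with
  | none => 0  -- unreachable under Pre_: min of an empty generator raises
  | some m =>
    -- alive = set(range(m)); each later row filters it; return len(alive)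
    let alive := (PySem.List.slice d (some 1) none).foldl
      (fun alive r => alive.filter
        (fun j => !(PySem.List.pyGetD first j 0 < PySem.List.pyGetD r j 0)))
      (PySem.List.pyRange 0 m 1)
    (alive.length : Int)

-- ===== PRECONDITION & SPEC =====
-- Pre_ excludes only d = [], where Python A raises ValueError (min of an empty sequence).
def Pre_count_greater (d : List (List Int)) : Prop := d ≠ []
instance (d : List (List Int)) : Decidable (Pre_count_greater d) := by unfold Pre_count_greater; infer_instance
def pvWitness_count_greater : List (List Int) := [[1, 0], [0, 2]]

def Spec_count_greater (d : List (List Int)) (out : Int) : Prop := out = count_greater_alt d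
instance (d : List (List Int)) (out : Int) : Decidable (Spec_count_greater d out) := by unfold Spec_count_greater; infer_instance

-- ===== CLAIM (what is proved, stated in full; the proofs are below) =====
def Claim_equal_count_greater : Prop := ∀ (d : List (List Int)), Dom_count_greater d → Pre_count_greater d → Spec_count_greater d (count_greater d)

-- ===== LEMMAS AND PROOFS =====

-- a chain of filters is one filter by the conjunction over the rows
theorem pv_foldl_filter (rows : List (List Int)) (p : List Int → Int → Bool)
    (s0 : List Int) :
    rows.foldl (fun s r => s.filter (p r)) s0
      = s0.filter (fun j => rows.all (fun r => p r j)) := by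
  induction rows generalizing s0 with
  | nil => simp
  | cons r t ih =>
    rw [List.foldl_cons, ih, List.filter_filter]
    refine List.filter_congr ?_
    intro j _
    simp [Bool.and_comm]

-- the flag loop of all_greater is a negated any
theorem pv_flag_foldl (q : Int → Prop) [DecidablePred q] (l : List Int) (flag : Bool) :
    l.foldl (fun f j => if q j then false else f) flag
      = (flag && !(l.any (fun j => decide (q j)))) := by
  induction l generalizing flag with
  | nil => simp
  | cons a t ih =>
    rw [List.foldl_cons, List.any_cons]
    by_cases h : q a
    · rw [if_pos h, ih]
      simp [h]
    · rw [if_neg h, ih]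
      simp [h]

-- all_greater as a column test
theorem all_greater_eq (d : List (List Int)) (r0 : List Int) (rest : List (List Int))
    (hd : d = r0 :: rest) (i : Nat) :
    all_greater (i : Int) (PySem.List.len d) d
      = !((rest.map (fun r => r.getD i 0)).any (fun x => r0.getD i 0 < x)) := by
  unfold all_greater
  rw [pv_flag_foldl
    (fun j => PySem.List.pyGetD (PySem.List.pyGetD d 0 []) (i:Int) 0 <
              PySem.List.pyGetD (PySem.List.pyGetD d j []) (i:Int) 0)]
  rw [Bool.true_and]
  congr 1
  have hmap := PySem.List.map_pyGetD_pyRange (xs := d) (d := ([] : List Int)) (a := 1) (by norm_num)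
  have h2 := congrArg (List.any ·
      (fun r => decide (PySem.List.pyGetD (PySem.List.pyGetD d 0 []) (i:Int) 0 <
                        PySem.List.pyGetD r (i:Int) 0))) hmap
  simp only [List.any_map] at h2
  calc (PySem.List.pyRange 1 (PySem.List.len d) 1).any
        (fun j => decide (PySem.List.pyGetD (PySem.List.pyGetD d 0 []) (i:Int) 0 <
          PySem.List.pyGetD (PySem.List.pyGetD d j []) (i:Int) 0))
      = (d.drop 1).any (fun r => decide (PySem.List.pyGetD (PySem.List.pyGetD d 0 []) (i:Int) 0 <
          PySem.List.pyGetD r (i:Int) 0)) := h2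
    _ = _ := by
        subst hd
        simp [PySem.List.pyGetD_zero_cons, PySem.List.pyGetD_natCast, List.any_map,
          Function.comp_def]

-- A's counting loop as a countP over the column indices
theorem count_greater_eq_countP (d : List (List Int)) (mrow : List Int)
    (hm : PySem.List.min? d (fun r => PySem.List.len r) = some mrow) :
    count_greater d =
      ((List.range mrow.length).countP
        (fun i : Nat => all_greater (i : Int) (PySem.List.len d) d) : Int) := by
  unfold count_greater
  rw [hm]
  simp only []
  rw [PySem.List.foldl_if_add_one, PySem.List.len_eq mrow, PySem.List.pyRange_one,
      List.countP_map, zero_add]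
  have h0 : (((mrow.length : Int)) - 0).toNat = mrow.length := by omega
  rw [h0]
  exact congrArg _ (List.countP_congr (fun x _ => by simp [Function.comp]))

-- ===== VERDICT (by name: the statement is the Claim_ definition above) =====
theorem count_greater_spec : Claim_equal_count_greater := by
  intro d _ hpre
  unfold Spec_count_greater
  obtain ⟨mrow, hm⟩ : ∃ m, PySem.List.min? d (fun r => PySem.List.len r) = some m := by
    cases hmm : PySem.List.min? d (fun r => PySem.List.len r) with
    | none => exact absurd ((PySem.List.min?_eq_none_iff d _).mp hmm) hpre
    | some m => exact ⟨m, rfl⟩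
  obtain ⟨r0, rest, rfl⟩ : ∃ r0 rest, d = r0 :: rest := by
    cases d with
    | nil => exact absurd rfl hpre
    | cons a t => exact ⟨a, t, rfl⟩
  rw [count_greater_eq_countP _ _ hm]
  unfold count_greater_alt
  obtain ⟨v, hv⟩ : ∃ v, PySem.List.min?
      ((r0 :: rest).map (fun r => PySem.List.len r)) (fun x => x) = some v := by
    cases hvv : PySem.List.min? ((r0 :: rest).map (fun r => PySem.List.len r)) (fun x => x) with
    | none => simpa using (PySem.List.min?_eq_none_iff _ _).mp hvv
    | some v => exact ⟨v, rfl⟩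
  have hveq : v = PySem.List.len mrow := by
    have hvmem := PySem.List.min?_mem hv
    have hvmin := PySem.List.min?_isMin hv
    have hmmem := PySem.List.min?_mem hm
    have hmmin := PySem.List.min?_isMin hm
    obtain ⟨r, hr, rfl⟩ := List.mem_map.mp hvmem
    exact le_antisymm (hmmin r hr)
      (hvmin _ (List.mem_map_of_mem hmmem)) |>.symm ▸ rfl
  rw [hv]
  simp only []
  rw [PySem.List.slice_from_one, List.tail_cons, PySem.List.pyGetD_zero_cons,
      pv_foldl_filter, ← List.countP_eq_length_filter, hveq,
      PySem.List.len_eq mrow, PySem.List.pyRange_one]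
  have h0 : (((mrow.length : Int)) - 0).toNat = mrow.length := by omega
  rw [List.countP_map, h0]
  refine congrArg _ (List.countP_congr ?_)
  intro i _
  rw [Function.comp_apply, all_greater_eq (r0 :: rest) r0 rest rfl i]
  simp [PySem.List.pyGetD_natCast, List.any_map, Function.comp_def]
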